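-- pv_equiv track=rewrite | github.com/yjkwon1996/algoStudy | 프로그래머스/lv3/12938. 최고의 집합/최고의 집합.py | solution
-- ===== SOURCE A (Python) =====
-- def solution(n, s):
--     answer = []
--
--     # 표준편차가 가장 적은 수로 만들어야 함
--     # ex) n=3, s=10 -> 3 * 3 * 4 이 나오도록
--     init = s // n
--     if init == 0 : # 합이 n인 집합을 못만듬
--         answer = [-1]
--         return answer
--
--     mod = s % n # +1을 해줘야 하는 값의 갯수
--
--     for i in range(n-mod) :
--         answer.append(init)
--     for i in range(mod) :
--         answer.append(init+1)
--
--     # 이렇게도 가능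
--     # return [init for _ in range(n-mod)] + [(init+1) for _ in range(mod)]
--
--     return answer
-- ===== SOURCE B (Python) =====
-- def solution(n, s):
--     init = s // n
--     if init == 0:
--         return [-1]
--     # distribute the remainder per-element: floor((s+i)/n) is init for the
--     # first n - s%n positions and init+1 for the last s%n positions
--     return [(s + i) // n for i in range(n)]
-- ===== Notes on version B (the rewrite author's own statement) =====
-- stated objective: idiomatic
-- what changed: Replaces the explicit mod computation and the two append loops by a single comprehension [(s+i)//n for i in range(n)] that distributes the remainder arithmetically per element.
import Mathlib
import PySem

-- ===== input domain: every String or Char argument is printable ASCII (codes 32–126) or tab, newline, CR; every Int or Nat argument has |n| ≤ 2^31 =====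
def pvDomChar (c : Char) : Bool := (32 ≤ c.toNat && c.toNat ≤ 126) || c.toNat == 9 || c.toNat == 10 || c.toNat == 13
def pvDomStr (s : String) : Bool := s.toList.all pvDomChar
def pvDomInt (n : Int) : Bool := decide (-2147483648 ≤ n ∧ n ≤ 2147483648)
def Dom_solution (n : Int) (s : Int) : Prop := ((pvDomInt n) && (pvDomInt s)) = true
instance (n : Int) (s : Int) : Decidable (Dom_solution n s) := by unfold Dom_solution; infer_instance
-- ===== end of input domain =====

-- B replaces A's explicit mod/two-append-loops construction by one comprehension
-- [(s+i)//n for i in range(n)] distributing the remainder per element (idiomatic).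


-- ===== PORT A =====
def solution (n : Int) (s : Int) : List Int :=
  let answer : List Int := []
  let init := PySem.Int.floordiv s n
  if init = 0 then
    [-1]
  else
    let md := PySem.Int.mod s n
    let answer := (PySem.List.pyRange 0 (n - md) 1).foldl (fun acc _ => acc ++ [init]) answer
    let answer := (PySem.List.pyRange 0 md 1).foldl (fun acc _ => acc ++ [init + 1]) answer
    answer

-- ===== PORT B =====
def solution_alt (n : Int) (s : Int) : List Int :=
  let init := PySem.Int.floordiv s n
  if init = 0 then
    [-1]
  else
    (PySem.List.pyRange 0 n 1).map (fun i => PySem.Int.floordiv (s + i) n)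

-- ===== PRECONDITION & SPEC =====
-- A raises ZeroDivisionError when n = 0; exactly those inputs are excluded.
def Pre_solution (n : Int) (s : Int) : Prop := n ≠ 0
instance (n : Int) (s : Int) : Decidable (Pre_solution n s) := by unfold Pre_solution; infer_instance
def pvWitness_solution : Int × Int := (3, 10)

def Spec_solution (n : Int) (s : Int) (out : List Int) : Prop := out = solution_alt n s
instance (n : Int) (s : Int) (out : List Int) : Decidable (Spec_solution n s out) := by unfold Spec_solution; infer_instance

-- ===== CLAIM (what is proved, stated in full; the proofs are below) =====
def Claim_equal_solution : Prop := ∀ (n : Int) (s : Int), Dom_solution n s → Pre_solution n s → Spec_solution n s (solution n s)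

-- ===== LEMMAS AND PROOFS =====

-- A's append loop over any list produces a block of repeated elements.
theorem foldl_append_replicate (x : Int) (l : List Int) (acc : List Int) :
    l.foldl (fun acc _ => acc ++ [x]) acc = acc ++ List.replicate l.length x := by
  induction l generalizing acc with
  | nil => simp
  | cons h t ih => simp [List.foldl, ih, List.replicate_succ]

-- For 0 < n, the bounds of Python's mod.
theorem mod_bounds_pos (s n : Int) (hn : 0 < n) :
    0 ≤ PySem.Int.mod s n ∧ PySem.Int.mod s n < n := by
  rw [PySem.Int.mod_eq_emod_of_pos hn]
  exact ⟨Int.emod_nonneg s (by omega), Int.emod_lt_of_pos s hn⟩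

-- For n < 0, Python's mod takes the divisor's sign: n < mod ≤ 0.
theorem mod_bounds_neg (s n : Int) (hn : n < 0) :
    n < PySem.Int.mod s n ∧ PySem.Int.mod s n ≤ 0 := by
  have h := mod_bounds_pos (-s) (-n) (by omega)
  have he : PySem.Int.mod s n = -PySem.Int.mod (-s) (-n) := by
    rw [← PySem.Int.mod_neg_neg (-s) (-n)]; simp
  omega

theorem floordiv_low (s n i : Int) (hn : 0 < n) (h0 : 0 ≤ i)
    (hi : i < n - PySem.Int.mod s n) :
    PySem.Int.floordiv (s + i) n = PySem.Int.floordiv s n := by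
  have hm := PySem.Int.floordiv_mul_add_mod s n
  have hb := mod_bounds_pos s n hn
  rw [PySem.Int.floordiv_eq_iff_of_pos hn]
  constructor
  · nlinarith [hm, hb.1]
  · nlinarith [hm, hb.2]

theorem floordiv_high (s n i : Int) (hn : 0 < n) (h0 : n - PySem.Int.mod s n ≤ i)
    (hi : i < n) :
    PySem.Int.floordiv (s + i) n = PySem.Int.floordiv s n + 1 := by
  have hm := PySem.Int.floordiv_mul_add_mod s n
  have hb := mod_bounds_pos s n hn
  rw [PySem.Int.floordiv_eq_iff_of_pos hn]
  constructor
  · nlinarith [hm, hb.1]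
  · nlinarith [hm, hb.2]

theorem map_const_replicate (l : List Int) (f : Int → Int) (c : Int)
    (h : ∀ x ∈ l, f x = c) : l.map f = List.replicate l.length c := by
  induction l with
  | nil => simp
  | cons a t ih =>
    simp only [List.map, List.length_cons, List.replicate_succ]
    exact congrArg₂ _ (h a (by simp)) (ih fun x hx => h x (by simp [hx]))

-- ===== VERDICT (by name: the statement is the Claim_ definition above) =====
theorem solution_spec : Claim_equal_solution := by
  intro n s _ hp
  unfold Spec_solution solution solution_alt
  simp only []
  by_cases hz : PySem.Int.floordiv s n = 0
  · simp [hz]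
  · simp only [hz, if_false]
    rcases lt_or_gt_of_ne hp with hn | hn
    · -- n < 0: every range involved is empty, both sides are []
      have hb := mod_bounds_neg s n hn
      rw [PySem.List.pyRange_one_eq_nil (a := 0) (b := n - PySem.Int.mod s n) (by omega),
          PySem.List.pyRange_one_eq_nil (a := 0) (b := PySem.Int.mod s n) (by omega),
          PySem.List.pyRange_one_eq_nil (a := 0) (b := n) (by omega)]
      simp
    · -- 0 < n
      have hb := mod_bounds_pos s n hn
      rw [foldl_append_replicate, foldl_append_replicate,
          PySem.List.pyRange_one_append 0 (n - PySem.Int.mod s n) n (by omega) (by omega),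
          List.map_append,
          map_const_replicate _ _ (PySem.Int.floordiv s n)
            (fun x hx => by
              rcases PySem.List.mem_pyRange_one.mp hx with ⟨h1, h2⟩
              exact floordiv_low s n x hn h1 h2),
          map_const_replicate _ _ (PySem.Int.floordiv s n + 1)
            (fun x hx => by
              rcases PySem.List.mem_pyRange_one.mp hx with ⟨h1, h2⟩
              exact floordiv_high s n x hn h1 h2)]
      simp [PySem.List.length_pyRange_one]
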